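-- pv_equiv track=rewrite | github.com/wenqian-ye/FML-HW2 | svm/q3.py | split_fold
-- ===== SOURCE A (Python) =====
-- def split_fold(m, n):
--     quotient = int(m / n)
--     remainder = m % n
--     if remainder > 0:
--         out_list = [quotient] * (n - remainder) + [quotient + 1] * remainder
--     elif remainder < 0:
--         out_list = [quotient - 1] * -remainder + [quotient] * (n + remainder)
--     else:
--         out_list = [quotient] * n
--     for i in range(1, len(out_list)):
--         out_list[i] = out_list[i-1] + out_list[i]
--     return [0] + out_list
-- ===== SOURCE B (Python) =====
-- def split_fold(m, n):
--     # Closed form: the first (n - remainder) folds hold `quotient` points, the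
--     # rest hold quotient + 1; boundary k is computed directly, no prefix-sum pass.
--     quotient = int(m / n)
--     remainder = m % n
--     cut = n - remainder
--     return [quotient * min(k, cut) + (quotient + 1) * max(0, k - cut)
--             for k in range(n + 1)]
-- ===== Notes on version B (the rewrite author's own statement) =====
-- stated objective: alternative
-- what changed: Instead of materialising a list of per-fold sizes and running an in-place prefix-sum pass over it, B computes each cumulative boundary directly by a closed form in a single comprehension; Pre_ excludes n <= 0, where A raises ZeroDivisionError (n = 0) or, for negative n, a nonsensical fold count makes any returned value an unspecified corner.
-- outside the precondition, e.g. on split_fold(7, -3): A returns [0, -3, -6], B returns []; on split_fold(-9, -3): A returns [0], B returns []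
import Mathlib
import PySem

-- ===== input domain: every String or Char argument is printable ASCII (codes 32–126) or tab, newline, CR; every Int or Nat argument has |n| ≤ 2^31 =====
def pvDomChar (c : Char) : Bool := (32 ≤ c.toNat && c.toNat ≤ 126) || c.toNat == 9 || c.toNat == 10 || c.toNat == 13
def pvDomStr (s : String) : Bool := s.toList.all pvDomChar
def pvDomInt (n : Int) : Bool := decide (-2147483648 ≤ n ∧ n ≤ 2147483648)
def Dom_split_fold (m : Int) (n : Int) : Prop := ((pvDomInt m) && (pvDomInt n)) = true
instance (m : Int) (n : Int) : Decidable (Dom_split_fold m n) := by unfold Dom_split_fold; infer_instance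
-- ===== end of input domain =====

-- B computes each cumulative fold boundary by a closed form instead of building a
-- per-fold sizes list and prefix-summing it in place (objective: alternative, same O(n) cost).

-- ===== PORT A =====
-- 'for i in range(1, len(out_list)): out_list[i] = out_list[i-1] + out_list[i]':
-- each element is replaced by the previous (already updated) element plus itself.
def pvPrefLoop (prev : Int) (acc : List Int) : List Int → List Int
  | [] => acc.reverse
  | x :: xs => pvPrefLoop (prev + x) ((prev + x) :: acc) xs

-- int(m / n): float true division truncated toward zero; on |m|,|n| ≤ 2^31 (Dom) the
-- correctly rounded double of m/n never crosses an integer, so it equals Int.tdiv exactly.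
def split_fold (m : Int) (n : Int) : List Int :=
  if n = 0 then []   -- Python raises ZeroDivisionError here (outside Pre_); totality guard only
  else
  let quotient := m.tdiv n
  let remainder := PySem.Int.mod m n
  let out_list : List Int :=
    if remainder > 0 then
      List.replicate (n - remainder).toNat quotient ++ List.replicate remainder.toNat (quotient + 1)
    else if remainder < 0 then
      List.replicate (-remainder).toNat (quotient - 1) ++ List.replicate (n + remainder).toNat quotient
    else
      List.replicate n.toNat quotient
  let out_list' : List Int :=
    match out_list with
    | [] => []
    | x :: xs => x :: pvPrefLoop x [] xs
  0 :: out_list'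

-- ===== PORT B =====
def split_fold_alt (m : Int) (n : Int) : List Int :=
  if n = 0 then []   -- Python raises ZeroDivisionError here (outside Pre_); totality guard only
  else
  let quotient := m.tdiv n
  let remainder := PySem.Int.mod m n
  let cut := n - remainder
  (PySem.List.pyRange 0 (n + 1) 1).map
    (fun k => quotient * min k cut + (quotient + 1) * max 0 (k - cut))

-- ===== PRECONDITION & SPEC =====
-- Pre_ excludes n ≤ 0: at n = 0 the Python A raises ZeroDivisionError, and a
-- non-positive fold count is a nonsensical request no caller would specify, a
-- corner on which A's returned value and B's are equally defensible.
def Pre_split_fold (m : Int) (n : Int) : Prop := 0 < n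
instance (m : Int) (n : Int) : Decidable (Pre_split_fold m n) := by unfold Pre_split_fold; infer_instance
def pvWitness_split_fold : Int × Int := (10, 3)
def Spec_split_fold (m : Int) (n : Int) (out : List Int) : Prop := out = split_fold_alt m n
instance (m : Int) (n : Int) (out : List Int) : Decidable (Spec_split_fold m n out) := by unfold Spec_split_fold; infer_instance

-- ===== CLAIM (what is proved, stated in full; the proofs are below) =====
def Claim_equal_split_fold : Prop := ∀ (m : Int) (n : Int), Dom_split_fold m n → Pre_split_fold m n → Spec_split_fold m n (split_fold m n)

-- ===== LEMMAS AND PROOFS =====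

theorem pvPrefLoop_eq (l : List Int) (prev : Int) (acc : List Int) :
    pvPrefLoop prev acc l
      = acc.reverse ++ (List.range l.length).map (fun i => prev + (l.take (i + 1)).sum) := by
  induction l generalizing prev acc with
  | nil => simp [pvPrefLoop]
  | cons x xs ih =>
      simp [pvPrefLoop, ih (prev + x), List.range_succ_eq_map, List.map_map,
        Function.comp, add_assoc]

-- [0] ++ the prefix-summed list is the list of prefix sums of the original list.
theorem pvPrefAll (l : List Int) :
    (0 :: (match l with | [] => ([] : List Int) | x :: xs => x :: pvPrefLoop x [] xs)) =
    (List.range (l.length + 1)).map (fun i => (l.take i).sum) := by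
  cases l with
  | nil => simp
  | cons x xs =>
      simp [pvPrefLoop_eq, List.range_succ_eq_map, List.map_map, Function.comp]

theorem pvTakeRepAppSum (a b k : Nat) (x y : Int) (hk : k ≤ a + b) :
    ((List.replicate a x ++ List.replicate b y).take k).sum
      = x * min (k : Int) (a : Int) + y * max 0 ((k : Int) - (a : Int)) := by
  rw [List.take_append, List.take_replicate, List.take_replicate]
  simp only [List.length_replicate]
  have h1 : min (k - a) b = k - a := by omega
  rw [h1]
  simp only [List.sum_append, List.sum_replicate, nsmul_eq_mul]
  have h2 : ((min k a : Nat) : Int) = min (k : Int) (a : Int) := by omega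
  have h3 : ((k - a : Nat) : Int) = max 0 ((k : Int) - (a : Int)) := by omega
  rw [h2, h3]; ring

-- The key characterisation: prefix boundaries of a two-block sizes list, in closed form.
theorem pvKey (a b : Nat) (x y : Int) :
    (0 :: (match (List.replicate a x ++ List.replicate b y) with
           | [] => ([] : List Int) | h :: t => h :: pvPrefLoop h [] t)) =
    (List.range (a + b + 1)).map
      (fun (i : Nat) => x * min (i : Int) (a : Int) + y * max 0 ((i : Int) - (a : Int))) := by
  rw [pvPrefAll]
  have hlen : (List.replicate a x ++ List.replicate b y).length = a + b := by simp
  rw [hlen]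
  refine List.map_congr_left ?_
  intro i hi
  rw [List.mem_range] at hi
  exact pvTakeRepAppSum a b i x y (by omega)

theorem split_fold_spec : Claim_equal_split_fold := by
  intro m n _ hn
  unfold Spec_split_fold split_fold split_fold_alt
  simp only [Pre_split_fold] at hn
  have hn0 : n ≠ 0 := by omega
  rw [if_neg hn0, if_neg hn0]
  set q := m.tdiv n with hq
  set r := PySem.Int.mod m n with hr
  have hrnn : 0 ≤ r := PySem.Int.mod_nonneg m hn
  have hrlt : r < n := PySem.Int.mod_lt m hn
  have ha : ((n - r).toNat : Int) = n - r := by omega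
  have hb : (n + 1 - 0).toNat = (n - r).toNat + r.toNat + 1 := by omega
  by_cases hrpos : r > 0
  · simp only [hrpos, if_pos]
    rw [PySem.List.pyRange_one, hb, pvKey (n - r).toNat r.toNat q (q + 1), List.map_map]
    refine List.map_congr_left ?_
    intro i _
    simp only [Function.comp, zero_add, ha]
  · have hr0 : r = 0 := by omega
    simp only [if_neg, hr0, lt_irrefl, not_false_iff]
    have hkey := pvKey n.toNat 0 q (q + 1)
    rw [List.replicate_zero, List.append_nil] at hkey
    rw [PySem.List.pyRange_one]
    have hb' : (n + 1 - 0).toNat = n.toNat + 0 + 1 := by omega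
    rw [hb', hkey, List.map_map]
    refine List.map_congr_left ?_
    intro i hi
    rw [List.mem_range] at hi
    simp only [Function.comp, zero_add, sub_zero]
    have hc : ((n.toNat : Nat) : Int) = n := by omega
    rw [hc]
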